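-- pv_equiv track=rewrite | github.com/pypi-data/pypi-mirror-382 | packages/sqlbot/sqlbot-2.0.0.tar.gz/sqlbot-2.0.0/sqlbot/core/dbt_service.py | _parse_dbt_table_output
-- ===== SOURCE A (Python) =====
-- def _parse_dbt_table_output(output: str):
--     """Parse dbt show table output into structured data."""
--     lines = [line.strip() for line in output.split('\n') if line.strip()]
--
--     # Find table header and separator
--     header_idx = -1
--     separator_idx = -1
--
--     for i, line in enumerate(lines):
--         if '|' in line and not '---' in line and header_idx == -1:
--             header_idx = i
--         elif '---' in line and '|' in line and header_idx != -1:
--             separator_idx = i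
--             break
--
--     if header_idx == -1 or separator_idx == -1:
--         return [], []
--
--     # Extract columns from header
--     header_line = lines[header_idx]
--     columns = [col.strip() for col in header_line.split('|') if col.strip()]
--
--     # Extract data rows (after separator)
--     data = []
--     for i in range(separator_idx + 1, len(lines)):
--         line = lines[i]
--         if '|' in line:
--             values = [val.strip() for val in line.split('|') if val.strip()]
--             if len(values) == len(columns):
--                 data.append(dict(zip(columns, values)))
--
--     return data, columns
-- ===== SOURCE B (Python) =====
-- def _parse_dbt_table_output(output: str):
--     """Single pass over stripped non-empty lines with a 3-state machine."""
--     state = 0  # 0 = looking for header, 1 = looking for separator, 2 = data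
--     columns = []
--     data = []
--     for raw in output.split('\n'):
--         line = raw.strip()
--         if not line:
--             continue
--         if state == 0:
--             if '|' in line and '---' not in line:
--                 columns = [c.strip() for c in line.split('|') if c.strip()]
--                 state = 1
--         elif state == 1:
--             if '---' in line and '|' in line:
--                 state = 2
--         else:
--             if '|' in line:
--                 values = [v.strip() for v in line.split('|') if v.strip()]
--                 if len(values) == len(columns):
--                     data.append(dict(zip(columns, values)))
--     if state != 2:
--         return [], []
--     return data, columns
-- ===== Notes on version B (the rewrite author's own statement) =====
-- stated objective: alternative
-- what changed: Replaced A's two-phase design (an enumerate scan locating header/separator indices, then a random-access range(sep+1, len) loop over the lines list) with a single pass over the split lines driven by an explicit 3-state machine (header/separator/data) that never materialises or indexes the stripped-lines list.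
import Mathlib
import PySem

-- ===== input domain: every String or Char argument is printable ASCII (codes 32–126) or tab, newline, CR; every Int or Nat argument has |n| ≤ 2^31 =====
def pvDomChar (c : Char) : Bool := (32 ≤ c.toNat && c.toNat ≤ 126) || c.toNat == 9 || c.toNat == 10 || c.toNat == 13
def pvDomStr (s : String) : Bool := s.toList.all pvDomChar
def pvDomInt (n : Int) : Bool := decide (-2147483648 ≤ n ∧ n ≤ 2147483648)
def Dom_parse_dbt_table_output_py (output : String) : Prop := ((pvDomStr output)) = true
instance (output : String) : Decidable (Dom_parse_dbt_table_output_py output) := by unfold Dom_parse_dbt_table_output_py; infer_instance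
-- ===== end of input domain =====

-- B replaces A's two-phase index hunt (enumerate to locate header/separator, then a random-access
-- range loop) by a single pass over the split lines with an explicit 3-state machine (alternative
-- decomposition, same asymptotic cost).


-- shared helpers: both Pythons contain these identical fragments
-- "'|' in line and '---' not in line"  (header-line test)
def pvP (line : String) : Bool := PySem.Str.isIn "|" line && !PySem.Str.isIn "---" line
-- "'---' in line and '|' in line"  (separator-line test)
def pvQ (line : String) : Bool := PySem.Str.isIn "---" line && PySem.Str.isIn "|" line
-- "[c.strip() for c in line.split('|') if c.strip()]"
def pvCells (line : String) : List String :=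
  (((PySem.Str.split? line "|").getD []).map PySem.Str.strip).filter (fun c => !c.toList.isEmpty)
-- "dict(zip(columns, values))"
def pvRow (columns values : List String) : List (String × String) :=
  ((columns.zip values).foldl (fun d kv => d.insert kv.1 kv.2)
    (PySem.Dict.empty : PySem.Dict String String)).items
-- the identical data-row step: "if '|' in line: values = …; if len(values) == len(columns): append"
def pvDataStep (columns : List String) (data : List (List (String × String))) (line : String) :
    List (List (String × String)) :=
  if PySem.Str.isIn "|" line then
    let values := pvCells line
    if values.length = columns.length then data ++ [pvRow columns values] else data
  else data

-- ===== PORT A =====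
-- A's first loop: 'for i, line in enumerate(lines): … break' with accumulators header_idx/separator_idx
def pvFindHS : List (Int × String) → Int → Int → Int × Int
  | [], h, s => (h, s)
  | (i, line) :: rest, h, s =>
    if pvP line && h == -1 then
      pvFindHS rest i s
    else if pvQ line && h != -1 then
      (h, i)      -- break
    else
      pvFindHS rest h s

def parse_dbt_table_output_py (output : String) : (List (List (String × String))) × List String :=
  let lines := (((PySem.Str.split? output "\n").getD []).map PySem.Str.strip).filter
      (fun l => !l.toList.isEmpty)
  let hs := pvFindHS (PySem.List.enumerate lines) (-1) (-1)
  let header_idx := hs.1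
  let separator_idx := hs.2
  if header_idx == -1 || separator_idx == -1 then ([], [])
  else
    let header_line := PySem.List.pyGetD lines header_idx ""
    let columns := pvCells header_line
    let data := (PySem.List.pyRange (separator_idx + 1) (PySem.List.len lines)).foldl
      (fun data i => pvDataStep columns data (PySem.List.pyGetD lines i "")) []
    (data, columns)

-- ===== PORT B =====
-- B's loop body after 'line = raw.strip()': the 3-state machine (0 header / 1 separator / 2 data)
def pvCore (st : Nat × List String × List (List (String × String))) (line : String) :
    Nat × List String × List (List (String × String)) :=
  if line.toList.isEmpty then st
  else
    let state := st.1
    let columns := st.2.1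
    let data := st.2.2
    if state = 0 then
      if pvP line then (1, pvCells line, data) else st
    else if state = 1 then
      if pvQ line then (2, columns, data) else st
    else
      (state, columns, pvDataStep columns data line)

def pvStepB (st : Nat × List String × List (List (String × String))) (raw : String) :
    Nat × List String × List (List (String × String)) :=
  pvCore st (PySem.Str.strip raw)

def parse_dbt_table_output_py_alt (output : String) : (List (List (String × String))) × List String :=
  let fin := ((PySem.Str.split? output "\n").getD []).foldl pvStepB (0, [], [])
  if fin.1 != 2 then ([], []) else (fin.2.2, fin.2.1)

-- ===== PRECONDITION & SPEC =====
def Spec_parse_dbt_table_output_py (output : String) (out : (List (List (String × String))) × List String) : Prop := out = parse_dbt_table_output_py_alt output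
instance (output : String) (out : (List (List (String × String))) × List String) : Decidable (Spec_parse_dbt_table_output_py output out) := by unfold Spec_parse_dbt_table_output_py; infer_instance

-- ===== CLAIM (what is proved, stated in full; the proofs are below) =====
def Claim_equal_parse_dbt_table_output_py : Prop := ∀ (output : String), Dom_parse_dbt_table_output_py output → Spec_parse_dbt_table_output_py output (parse_dbt_table_output_py output)

-- ===== LEMMAS AND PROOFS =====

lemma pvCore_empty (st : Nat × List String × List (List (String × String))) (l : String)
    (h : l.toList.isEmpty = true) : pvCore st l = st := by
  simp [pvCore, h]

-- B's fold over the raw lines is the fold of pvCore over A's 'lines'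
lemma foldl_core_filter (ls : List String) (st : Nat × List String × List (List (String × String))) :
    ls.foldl pvCore st = (ls.filter (fun l => !l.toList.isEmpty)).foldl pvCore st := by
  induction ls generalizing st with
  | nil => rfl
  | cons l rest ih =>
    by_cases h : l.toList.isEmpty = true
    · simp [List.foldl, h, pvCore_empty _ _ h, ih]
    · simp only [Bool.not_eq_true] at h
      simp [List.foldl, h, ih]

-- phase 2: in state 2 the machine just runs pvDataStep
lemma foldB2 (ls : List String) (cols : List String) (data : List (List (String × String)))
    (hne : ∀ l ∈ ls, l.toList.isEmpty = false) :
    ls.foldl pvCore (2, cols, data) = (2, cols, ls.foldl (pvDataStep cols) data) := by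
  induction ls generalizing data with
  | nil => rfl
  | cons l rest ih =>
    have h := hne l (by simp)
    simp only [List.foldl]
    rw [show pvCore (2, cols, data) l = (2, cols, pvDataStep cols data l) by simp [pvCore, h]]
    exact ih _ (fun x hx => hne x (by simp [hx]))

-- phase 1: the machine waits for the first pvQ line
lemma foldB1 (ls : List String) (cols : List String) (data : List (List (String × String)))
    (hne : ∀ l ∈ ls, l.toList.isEmpty = false) :
    ls.foldl pvCore (1, cols, data) =
      match ls.findIdx? pvQ with
      | none => (1, cols, data)
      | some j => (2, cols, (ls.drop (j + 1)).foldl (pvDataStep cols) data) := by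
  induction ls with
  | nil => rfl
  | cons l rest ih =>
    have h := hne l (by simp)
    have hrest : ∀ x ∈ rest, x.toList.isEmpty = false := fun x hx => hne x (by simp [hx])
    by_cases hq : pvQ l = true
    · have : pvCore (1, cols, data) l = (2, cols, data) := by simp [pvCore, h, hq]
      simp [List.foldl, this, List.findIdx?_cons, hq, foldB2 rest cols data hrest]
    · have hq' : pvQ l = false := by simpa using hq
      have : pvCore (1, cols, data) l = (1, cols, data) := by simp [pvCore, h, hq']
      rw [List.foldl, this, ih hrest, List.findIdx?_cons, hq']
      cases rest.findIdx? pvQ <;> simp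

-- phase 0: the machine waits for the first pvP line
lemma foldB0 (ls : List String)
    (hne : ∀ l ∈ ls, l.toList.isEmpty = false) :
    ls.foldl pvCore (0, [], []) =
      match ls.findIdx? pvP with
      | none => (0, [], [])
      | some i => (ls.drop (i + 1)).foldl pvCore (1, pvCells (ls.getD i ""), []) := by
  induction ls with
  | nil => rfl
  | cons l rest ih =>
    have h := hne l (by simp)
    have hrest : ∀ x ∈ rest, x.toList.isEmpty = false := fun x hx => hne x (by simp [hx])
    by_cases hp : pvP l = true
    · have : pvCore (0, [], []) l = (1, pvCells l, []) := by simp [pvCore, h, hp]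
      simp [List.foldl, this, List.findIdx?_cons, hp]
    · have hp' : pvP l = false := by simpa using hp
      have : pvCore (0, [], []) l = (0, [], []) := by simp [pvCore, h, hp']
      rw [List.foldl, this, ih hrest, List.findIdx?_cons, hp']
      cases rest.findIdx? pvP <;> simp

-- A's locator, second phase: header already found (h ≠ -1), hunting for the separator
lemma findHS2 (ls : List String) (k : Int) (h : Int) (hh : h ≠ -1) :
    pvFindHS (PySem.List.enumerate ls k) h (-1) =
      match ls.findIdx? pvQ with
      | none => (h, -1)
      | some j => (h, k + j) := by
  induction ls generalizing k with
  | nil => rfl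
  | cons l rest ih =>
    rw [show PySem.List.enumerate (l :: rest) k = (k, l) :: PySem.List.enumerate rest (k + 1) by
      simp [PySem.List.enumerate]]
    have hh' : (h == -1) = false := by simpa using hh
    have hh'' : (h != -1) = true := by simp [bne, hh']
    by_cases hq : pvQ l = true
    · have hpl : pvP l = false := by
        simp only [pvQ, Bool.and_eq_true] at hq
        simp only [pvP, hq.1, Bool.not_true, Bool.and_false]
      simp [pvFindHS, hpl, hq, hh'', List.findIdx?_cons]
    · have hq' : pvQ l = false := by simpa using hq
      have step : pvFindHS ((k, l) :: PySem.List.enumerate rest (k + 1)) h (-1)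
          = pvFindHS (PySem.List.enumerate rest (k + 1)) h (-1) := by
        simp [pvFindHS, hh', hq']
      rw [step, ih (k + 1), List.findIdx?_cons, hq']
      cases hq2 : rest.findIdx? pvQ with
      | none => simp
      | some j => simp; omega

-- A's locator from scratch
lemma findHS1 (ls : List String) (k : Int) (hk : 0 ≤ k) :
    pvFindHS (PySem.List.enumerate ls k) (-1) (-1) =
      match ls.findIdx? pvP with
      | none => (-1, -1)
      | some i =>
        match (ls.drop (i + 1)).findIdx? pvQ with
        | none => (k + i, -1)
        | some j => (k + i, k + i + 1 + j) := by
  induction ls generalizing k with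
  | nil => rfl
  | cons l rest ih =>
    rw [show PySem.List.enumerate (l :: rest) k = (k, l) :: PySem.List.enumerate rest (k + 1) by
      simp [PySem.List.enumerate]]
    by_cases hp : pvP l = true
    · have hk' : k ≠ -1 := by omega
      rw [show pvFindHS ((k, l) :: PySem.List.enumerate rest (k + 1)) (-1) (-1)
          = pvFindHS (PySem.List.enumerate rest (k + 1)) k (-1) by simp [pvFindHS, hp]]
      rw [findHS2 rest (k + 1) k hk', List.findIdx?_cons, if_pos hp]
      cases hq2 : rest.findIdx? pvQ with
      | none => simp [hq2]
      | some j => simp [hq2]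
    · have hp' : pvP l = false := by simpa using hp
      have step : pvFindHS ((k, l) :: PySem.List.enumerate rest (k + 1)) (-1) (-1)
          = pvFindHS (PySem.List.enumerate rest (k + 1)) (-1) (-1) := by
        simp [pvFindHS, hp']
      rw [step, ih (k + 1) (by omega), List.findIdx?_cons, hp']
      cases hfi : rest.findIdx? pvP with
      | none => rfl
      | some i =>
        simp only [Option.map_some]
        cases hq2 : (rest.drop (i + 1)).findIdx? pvQ with
        | none => simp [hq2]; omega
        | some j => simp [hq2]; omega

-- ===== VERDICT (by name: the statement is the Claim_ definition above) =====
theorem parse_dbt_table_output_py_spec : Claim_equal_parse_dbt_table_output_py := by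
  intro output _
  unfold Spec_parse_dbt_table_output_py
  simp only [parse_dbt_table_output_py, parse_dbt_table_output_py_alt]
  set lines := (((PySem.Str.split? output "\n").getD []).map PySem.Str.strip).filter
      (fun l => !l.toList.isEmpty) with hlines
  have hne : ∀ l ∈ lines, l.toList.isEmpty = false := by
    intro l hl
    have := List.of_mem_filter hl
    simpa using this
  have hB : ((PySem.Str.split? output "\n").getD []).foldl pvStepB (0, [], [])
      = lines.foldl pvCore (0, [], []) := by
    rw [show pvStepB = (fun st raw => pvCore st (PySem.Str.strip raw)) from rfl]
    rw [← List.foldl_map (f := PySem.Str.strip) (g := pvCore)]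
    rw [hlines, foldl_core_filter]
  cases hfp : lines.findIdx? pvP with
  | none =>
    rw [hB, foldB0 lines hne, findHS1 lines 0 (by norm_num)]
    simp [hfp]
  | some i =>
    have hrest : ∀ x ∈ lines.drop (i + 1), x.toList.isEmpty = false :=
      fun x hx => hne x (List.mem_of_mem_drop hx)
    cases hfq : (lines.drop (i + 1)).findIdx? pvQ with
    | none =>
      rw [hB, foldB0 lines hne, findHS1 lines 0 (by norm_num)]
      simp only [hfp, hfq]
      simp [foldB1 _ _ _ hrest, hfq]
    | some j =>
      rw [hB, foldB0 lines hne, findHS1 lines 0 (by norm_num)]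
      simp only [hfp, hfq]
      simp only [foldB1 _ _ _ hrest, hfq]
      have hii : ((0 : Int) + i == -1) = false := by
        simp only [beq_eq_false_iff_ne, ne_eq]; omega
      have hjj : ((0 : Int) + i + 1 + j == -1) = false := by
        simp only [beq_eq_false_iff_ne, ne_eq]; omega
      simp only [hii, hjj, Bool.or_self, if_false, bne_self_eq_false, Bool.false_eq_true]
      have hget : PySem.List.pyGetD lines ((0 : Int) + i) "" = lines.getD i "" := by
        rw [show ((0 : Int) + i) = (i : Int) by ring, PySem.List.pyGetD_natCast]
      simp only [hget]
      rw [PySem.List.foldl_pyRange_pyGetD lines "" (pvDataStep (pvCells (lines.getD i ""))) []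
        (a := (0 : Int) + i + 1 + j + 1) (by omega)]
      rw [List.drop_drop, show ((0 : Int) + i + 1 + j + 1).toNat = i + 1 + (j + 1) from by omega]
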